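-- pv_equiv track=rewrite | github.com/gretushka/AI_homework | 4_6_cycle.py | my_cycle
-- ===== SOURCE A (Python) =====
-- from itertools import count, cycle, islice
--
-- def my_cycle(object):
--     с = 0
--     stop = len(object) * 5
--     for el in cycle(object):
--         if с == stop:
--             break
--         с += 1
--         yield el
-- ===== SOURCE B (Python) =====
-- def my_cycle(object):
--     for _ in range(5):
--         yield from object
-- ===== Notes on version B (the rewrite author's own statement) =====
-- stated objective: simpler
-- what changed: Two nested passes (outer range(5), inner yield from object) replace the infinite cycle() stream with a manual counter, precomputed stop = len*5 and a break.
import Mathlib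
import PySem

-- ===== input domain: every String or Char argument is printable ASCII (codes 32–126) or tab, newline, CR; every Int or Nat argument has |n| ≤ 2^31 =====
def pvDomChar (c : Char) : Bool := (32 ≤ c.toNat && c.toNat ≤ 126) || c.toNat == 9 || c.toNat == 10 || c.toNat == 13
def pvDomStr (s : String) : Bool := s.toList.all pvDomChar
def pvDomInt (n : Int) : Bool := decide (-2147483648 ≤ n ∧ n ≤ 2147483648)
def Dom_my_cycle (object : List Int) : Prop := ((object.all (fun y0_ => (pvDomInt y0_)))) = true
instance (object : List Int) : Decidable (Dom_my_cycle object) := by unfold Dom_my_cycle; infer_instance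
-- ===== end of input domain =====

-- B replaces A's cycle()+counter+break loop with two nested passes (outer 5×, inner over the list): simpler, same cost.

-- ===== PORT A =====
-- A iterates cycle(object) (cur = the tail of the current pass; restart from object when exhausted),
-- counting yielded elements and breaking when the count reaches stop = len(object)*5.
-- `remaining = stop - с` decreases by one per yielded element; cycle([]) yields nothing, ending the loop.
def myCycleAux (orig cur : List Int) (remaining : Nat) : List Int :=
  match remaining with
  | 0 => []
  | Nat.succ n =>
    match cur with
    | x :: xs => x :: myCycleAux orig xs n
    | [] =>
      match orig with
      | [] => []
      | x :: xs => x :: myCycleAux orig xs n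

def my_cycle (object : List Int) : List Int :=
  myCycleAux object object (object.length * 5)

-- ===== PORT B =====
-- B: for _ in range(5): yield from object
def my_cycle_alt (object : List Int) : List Int :=
  (List.range 5).foldl (fun acc _ => acc ++ object) []

-- ===== PRECONDITION & SPEC =====
def Spec_my_cycle (object : List Int) (out : List Int) : Prop := out = my_cycle_alt object
instance (object : List Int) (out : List Int) : Decidable (Spec_my_cycle object out) := by unfold Spec_my_cycle; infer_instance

-- ===== CLAIM (what is proved, stated in full; the proofs are below) =====
def Claim_equal_my_cycle : Prop := ∀ (object : List Int), Dom_my_cycle object → Spec_my_cycle object (my_cycle object)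

-- ===== LEMMAS AND PROOFS =====

-- One full pass through `cur` (then continuing from a fresh copy of orig).
theorem myCycleAux_pass (orig : List Int) (h : orig ≠ []) :
    ∀ (cur : List Int) (m : Nat),
      myCycleAux orig cur (cur.length + m) = cur ++ myCycleAux orig orig m := by
  intro cur
  induction cur with
  | nil =>
    intro m
    cases m with
    | zero => simp [myCycleAux]
    | succ n =>
      cases orig with
      | nil => exact absurd rfl h
      | cons x xs => simp [myCycleAux]
  | cons c cs ih =>
    intro m
    have : (c :: cs).length + m = Nat.succ (cs.length + m) := by simp [List.length_cons]; omega
    rw [this]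
    simp only [myCycleAux, ih m, List.cons_append]

theorem myCycleAux_flatten (orig : List Int) :
    ∀ (k : Nat), myCycleAux orig orig (orig.length * k) = (List.replicate k orig).flatten := by
  intro k
  induction k with
  | zero => simp [myCycleAux]
  | succ n ih =>
    cases orig with
    | nil => simp [myCycleAux]
    | cons x xs =>
      have hne : (x :: xs) ≠ ([] : List Int) := by simp
      have : (x :: xs).length * (n + 1) = (x :: xs).length + (x :: xs).length * n := by ring
      rw [this, myCycleAux_pass _ hne, ih]
      simp [List.replicate_succ]

theorem foldl_range_append (object : List Int) :
    ∀ (k : Nat), (List.range k).foldl (fun acc _ => acc ++ object) [] = (List.replicate k object).flatten := by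
  intro k
  induction k with
  | zero => simp
  | succ n ih =>
    rw [List.range_succ, List.foldl_append, ih, List.replicate_succ']
    simp

-- ===== VERDICT (by name: the statement is the Claim_ definition above) =====
theorem my_cycle_spec : Claim_equal_my_cycle := by
  intro object _
  unfold Spec_my_cycle my_cycle my_cycle_alt
  rw [myCycleAux_flatten, foldl_range_append]
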